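-- pv_equiv track=rewrite | github.com/EgorMalinovsky/TasksLesson | Lessons/Lesson_6/task_12.py | find_columns_with_number
-- ===== SOURCE A (Python) =====
-- def find_columns_with_number(matrix, h):
--     # Функция для определения столбцов содержащие хотя бы одно вхождение числа h, а какие не содержат
--     columns_with_h = []
--     columns_without_h = []
--
--     for col in range(len(matrix[0])):
--         found = False
--         for row in range(len(matrix)):
--             if matrix[row][col] == h:
--                 found = True
--                 break
--         if found:
--             columns_with_h.append(col)
--         else:
--             columns_without_h.append(col)
--
--     return columns_with_h, columns_without_h
-- ===== SOURCE B (Python) =====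
-- def find_columns_with_number(matrix, h):
--     # One row-major pass collects the set of column indices where h occurs
--     # (each row scanned over its own cells), then the two output lists are
--     # read off in column order.
--     ncols = len(matrix[0])
--     found_cols = {c for row in matrix for c, x in enumerate(row) if x == h}
--     columns_with_h = [c for c in range(ncols) if c in found_cols]
--     columns_without_h = [c for c in range(ncols) if c not in found_cols]
--     return columns_with_h, columns_without_h
-- ===== Notes on version B (the rewrite author's own statement) =====
-- stated objective: alternative
-- what changed: A's column-major nested scan with a per-column early-break flag is replaced by a single row-major pass that collects the set of columns containing h, after which both output lists are read off by filtering the column range.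
import Mathlib
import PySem

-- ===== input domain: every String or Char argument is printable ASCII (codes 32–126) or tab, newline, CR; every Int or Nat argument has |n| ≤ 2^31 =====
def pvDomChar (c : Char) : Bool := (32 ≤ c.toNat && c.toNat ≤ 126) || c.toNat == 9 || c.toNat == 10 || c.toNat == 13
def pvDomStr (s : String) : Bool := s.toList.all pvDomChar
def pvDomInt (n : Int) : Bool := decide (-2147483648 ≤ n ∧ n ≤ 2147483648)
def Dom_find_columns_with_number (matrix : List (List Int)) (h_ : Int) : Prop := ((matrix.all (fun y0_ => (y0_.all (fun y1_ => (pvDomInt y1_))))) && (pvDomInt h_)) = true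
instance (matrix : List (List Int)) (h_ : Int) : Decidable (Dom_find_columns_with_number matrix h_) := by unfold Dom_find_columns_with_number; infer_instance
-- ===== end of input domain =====

-- B replaces A's per-column early-break column-major scan by one row-major pass
-- collecting the set of columns containing h, then filters the column range
-- (objective: alternative).

-- ===== PORT A =====
def find_columns_with_number (matrix : List (List Int)) (h_ : Int) : List Int × List Int :=
  (PySem.List.pyRange 0 ((PySem.List.pyGet? matrix 0).getD []).length 1).foldl
    (fun acc col =>
      -- 'found = False; for row …: if matrix[row][col] == h: found = True; break'
      let found := (PySem.List.pyRange 0 matrix.length 1).any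
        (fun row => PySem.List.pyGetD (PySem.List.pyGetD matrix row []) col 0 == h_)
      if found then (acc.1 ++ [col], acc.2) else (acc.1, acc.2 ++ [col]))
    ([], [])

-- ===== PORT B =====
def find_columns_with_number_alt (matrix : List (List Int)) (h_ : Int) : List Int × List Int :=
  let ncols : Int := ((PySem.List.pyGet? matrix 0).getD []).length
  let found_cols : PySem.Set Int :=
    matrix.foldl (fun s row =>
      (PySem.List.enumerate row 0).foldl (fun s p =>
        if p.2 == h_ then PySem.Set.add s p.1 else s) s)
      PySem.Set.empty
  ((PySem.List.pyRange 0 ncols 1).filter (fun c => PySem.Set.contains found_cols c),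
   (PySem.List.pyRange 0 ncols 1).filter (fun c => !PySem.Set.contains found_cols c))

-- ===== PRECONDITION & SPEC =====
-- every row-i short at a column c of row 0 must be preceded by a row j that really
-- contains h_ at column c (then A's early break skips the short row)
def pvColsOk (matrix : List (List Int)) (h_ : Int) : Prop :=
  ∀ i < matrix.length, ∀ c < ((PySem.List.pyGet? matrix 0).getD []).length,
    (matrix.getD i []).length ≤ c →
      ∃ j < i, c < (matrix.getD j []).length ∧ (matrix.getD j []).getD c 0 = h_

-- Pre_ is exactly where Python A returns: the matrix is non-empty (matrix[0] raises
-- IndexError on []) and no column scan of A hits a row shorter than that column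
-- before a real match (otherwise A raises IndexError).
def Pre_find_columns_with_number (matrix : List (List Int)) (h_ : Int) : Prop :=
  matrix ≠ [] ∧ pvColsOk matrix h_
instance (matrix : List (List Int)) (h_ : Int) : Decidable (Pre_find_columns_with_number matrix h_) := by unfold Pre_find_columns_with_number pvColsOk; infer_instance
def pvWitness_find_columns_with_number : List (List Int) × Int := ([[1, 2, 3], [4, 1, 6]], 1)

def Spec_find_columns_with_number (matrix : List (List Int)) (h_ : Int) (out : List Int × List Int) : Prop := out = find_columns_with_number_alt matrix h_
instance (matrix : List (List Int)) (h_ : Int) (out : List Int × List Int) : Decidable (Spec_find_columns_with_number matrix h_ out) := by unfold Spec_find_columns_with_number; infer_instance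

-- ===== CLAIM (what is proved, stated in full; the proofs are below) =====
def Claim_equal_find_columns_with_number : Prop := ∀ (matrix : List (List Int)) (h_ : Int), Dom_find_columns_with_number matrix h_ → Pre_find_columns_with_number matrix h_ → Spec_find_columns_with_number matrix h_ (find_columns_with_number matrix h_)
-- ===== LEMMAS AND PROOFS =====

-- A's loop: append-to-one-of-two-lists fold = a pair of filters.
theorem pv_pairfold (l : List Int) (p : Int → Bool) (a b : List Int) :
    l.foldl (fun acc col => if p col then (acc.1 ++ [col], acc.2) else (acc.1, acc.2 ++ [col])) (a, b)
      = (a ++ l.filter p, b ++ l.filter (fun c => !p c)) := by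
  induction l generalizing a b with
  | nil => simp
  | cons x xs ih =>
    by_cases hx : p x = true <;> simp [List.foldl_cons, hx, ih]

-- Membership in an add-if fold over any list.
theorem pv_mem_addfold {β : Type} (l : List β) (q : β → Bool) (f : β → Int) (s : PySem.Set Int) (c : Int) :
    c ∈ l.foldl (fun s x => if q x then PySem.Set.add s (f x) else s) s
      ↔ c ∈ s ∨ ∃ x ∈ l, q x = true ∧ f x = c := by
  induction l generalizing s with
  | nil => simp
  | cons y ys ih =>
    by_cases hy : q y = true
    · simp only [List.foldl_cons, hy, if_pos, ih, PySem.Set.mem_add, List.mem_cons]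
      constructor
      · rintro (⟨h | h⟩ | ⟨x, hx, hq, hf⟩)
        · exact Or.inl h
        · exact Or.inr ⟨y, Or.inl rfl, hy, h.symm⟩
        · exact Or.inr ⟨x, Or.inr hx, hq, hf⟩
      · rintro (h | ⟨x, (rfl | hx), hq, hf⟩)
        · exact Or.inl (Or.inl h)
        · exact Or.inl (Or.inr hf.symm)
        · exact Or.inr ⟨x, hx, hq, hf⟩
    · simp only [List.foldl_cons, hy, if_neg, Bool.false_eq_true, not_false_iff, ih, List.mem_cons]
      constructor
      · rintro (h | ⟨x, hx, hq, hf⟩)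
        · exact Or.inl h
        · exact Or.inr ⟨x, Or.inr hx, hq, hf⟩
      · rintro (h | ⟨x, (rfl | hx), hq, hf⟩)
        · exact Or.inl h
        · exact absurd hq (by simp [hy])
        · exact Or.inr ⟨x, hx, hq, hf⟩

-- Membership in B's row-major double fold.
theorem pv_mem_rowsfold (rows : List (List Int)) (h_ : Int) (s : PySem.Set Int) (c : Int) :
    c ∈ rows.foldl (fun s row =>
        (PySem.List.enumerate row 0).foldl (fun s p =>
          if p.2 == h_ then PySem.Set.add s p.1 else s) s) s
      ↔ c ∈ s ∨ ∃ row ∈ rows, ∃ p ∈ PySem.List.enumerate row 0, p.2 = h_ ∧ p.1 = c := by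
  induction rows generalizing s with
  | nil => simp
  | cons r rs ih =>
    simp only [List.foldl_cons, ih, List.mem_cons]
    rw [pv_mem_addfold]
    simp only [beq_iff_eq]
    constructor
    · rintro ((h | ⟨p, hp, hq, hf⟩) | ⟨row, hr, p, hp, hq, hf⟩)
      · exact Or.inl h
      · exact Or.inr ⟨r, Or.inl rfl, p, hp, hq, hf⟩
      · exact Or.inr ⟨row, Or.inr hr, p, hp, hq, hf⟩
    · rintro (h | ⟨row, (rfl | hr), p, hp, hq, hf⟩)
      · exact Or.inl (Or.inl h)
      · exact Or.inl (Or.inr ⟨p, hp, hq, hf⟩)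
      · exact Or.inr ⟨row, hr, p, hp, hq, hf⟩

-- The crux: under Pre_, A's per-column "found" flag agrees with membership in B's set.
theorem pv_key (matrix : List (List Int)) (h_ : Int)
    (hpre : Pre_find_columns_with_number matrix h_) :
    ∀ c ∈ PySem.List.pyRange 0 (((PySem.List.pyGet? matrix 0).getD []).length : Int) 1,
      ((PySem.List.pyRange 0 (matrix.length : Int) 1).any
        (fun row => PySem.List.pyGetD (PySem.List.pyGetD matrix row []) c 0 == h_))
      = PySem.Set.contains
          (matrix.foldl (fun s row =>
            (PySem.List.enumerate row 0).foldl (fun s p =>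
              if p.2 == h_ then PySem.Set.add s p.1 else s) s)
            PySem.Set.empty) c := by
  intro c hc
  obtain ⟨hc0, hcw⟩ := (PySem.List.mem_pyRange_one).mp hc
  rw [Bool.eq_iff_iff, PySem.Set.contains_iff, pv_mem_rowsfold]
  simp only [PySem.Set.empty, List.not_mem_nil, false_or, List.any_eq_true]
  constructor
  · rintro ⟨r, hr, hpred⟩
    obtain ⟨hr0, hrn⟩ := (PySem.List.mem_pyRange_one).mp hr
    have hrn' : r.toNat < matrix.length := by omega
    have hrow : PySem.List.pyGetD matrix r [] = matrix[r.toNat] := by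
      rw [PySem.List.pyGetD_of_nonneg _ _ hr0]
      simp [List.getElem?_eq_getElem hrn']
    rw [hrow] at hpred
    by_cases hlen : c.toNat < matrix[r.toNat].length
    · -- genuine cell
      have hval : PySem.List.pyGetD matrix[r.toNat] c 0 = matrix[r.toNat][c.toNat] := by
        rw [PySem.List.pyGetD_of_nonneg _ _ hc0]
        simp [List.getElem?_eq_getElem hlen]
      rw [hval, beq_iff_eq] at hpred
      refine ⟨matrix[r.toNat], List.getElem_mem hrn', (c, h_), ?_, rfl, rfl⟩
      rw [PySem.List.mem_enumerate_iff]
      refine ⟨c.toNat, hlen, ?_⟩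
      simp [Prod.ext_iff, hpred]
      omega
    · -- default hit: use Pre_ to find the real earlier match
      have hlen' : matrix[r.toNat].length ≤ c.toNat := le_of_not_gt hlen
      have hgd : matrix.getD r.toNat [] = matrix[r.toNat] := List.getD_eq_getElem _ _ hrn'
      have hcw' : c.toNat < ((PySem.List.pyGet? matrix 0).getD []).length := by omega
      obtain ⟨j, hji, hjlen, hjval⟩ := hpre.2 r.toNat hrn' c.toNat hcw' (by rw [hgd]; exact hlen')
      have hjn : j < matrix.length := lt_trans hji hrn'
      have hgdj : matrix.getD j [] = matrix[j] := List.getD_eq_getElem _ _ hjn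
      rw [hgdj] at hjlen hjval
      rw [List.getD_eq_getElem _ _ hjlen] at hjval
      refine ⟨matrix[j], List.getElem_mem hjn, (c, h_), ?_, rfl, rfl⟩
      rw [PySem.List.mem_enumerate_iff]
      refine ⟨c.toNat, hjlen, ?_⟩
      simp [Prod.ext_iff, hjval]
      omega
  · rintro ⟨row, hrow, p, hp, hq, hf⟩
    obtain ⟨j, hjn, hjrow⟩ := List.mem_iff_getElem.mp hrow
    obtain ⟨k, hk, hpk⟩ := (PySem.List.mem_enumerate_iff row 0 p).mp hp
    refine ⟨(j : Int), (PySem.List.mem_pyRange_one).mpr ⟨by omega, by exact_mod_cast hjn⟩, ?_⟩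
    have h1 : PySem.List.pyGetD matrix (j : Int) [] = row := by
      rw [PySem.List.pyGetD_of_nonneg _ _ (Int.natCast_nonneg j)]
      simp [List.getElem?_eq_getElem hjn, hjrow]
    have hck : c = (k : Int) := by
      have h' := hf
      rw [hpk] at h'
      simpa using h'.symm
    have hv : row[k] = h_ := by
      have h' := hq
      rw [hpk] at h'
      simpa using h'
    have h2 : PySem.List.pyGetD row c 0 = row[k] := by
      rw [hck, PySem.List.pyGetD_of_nonneg _ _ (Int.natCast_nonneg k)]
      simp [List.getElem?_eq_getElem hk]
    rw [h1, h2, hv]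
    simp

-- ===== VERDICT (by name: the statement is the Claim_ definition above) =====
theorem find_columns_with_number_spec : Claim_equal_find_columns_with_number := by
  intro matrix h_ _ hpre
  unfold Spec_find_columns_with_number find_columns_with_number find_columns_with_number_alt
  rw [pv_pairfold]
  simp only [List.nil_append]
  have key := pv_key matrix h_ hpre
  have key2 : ∀ c ∈ PySem.List.pyRange 0 (((PySem.List.pyGet? matrix 0).getD []).length : Int) 1,
      (!(PySem.List.pyRange 0 (matrix.length : Int) 1).any
        (fun row => PySem.List.pyGetD (PySem.List.pyGetD matrix row []) c 0 == h_))
      = !PySem.Set.contains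
          (matrix.foldl (fun s row =>
            (PySem.List.enumerate row 0).foldl (fun s p =>
              if p.2 == h_ then PySem.Set.add s p.1 else s) s)
            PySem.Set.empty) c := fun c hc => by rw [key c hc]
  rw [List.filter_congr key, List.filter_congr key2]
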